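-- pv_equiv track=rewrite | github.com/NihilistPenguin/badSubCipherDecoder | crackSubCipher.py | word2pattern
-- ===== SOURCE A (Python) =====
-- import string
--
-- def word2pattern(word):
-- 	alphabet = string.ascii_lowercase
-- 	buildPattern =  ""
-- 	dic = {}
-- 	i = 0
-- 	for letter in word:
-- 		# if we haven't seen the letter yet
-- 		if letter not in dic.keys():
-- 			# add to lookup dictionary
-- 			# assign next unused letter from alphabet
-- 			dic[letter] = alphabet[i]
-- 			# also add that alphabetical letter
-- 			# to our output string
-- 			buildPattern = buildPattern + alphabet[i]
-- 			# iterate to next alphabet letter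
-- 			i += 1
-- 		else: # if we have seen the letter already
-- 			# look up assigned buildPattern letter in dic
-- 			buildPattern = buildPattern + dic[letter]
--
-- 	return(buildPattern)
-- ===== SOURCE B (Python) =====
-- import string
--
-- def word2pattern(word):
-- 	# Per-character closed form: the pattern letter for c is indexed by the
-- 	# number of distinct characters strictly before c's first occurrence.
-- 	return ''.join(string.ascii_lowercase[len(set(word[:word.index(c)]))] for c in word)
-- ===== Notes on version B (the rewrite author's own statement) =====
-- stated objective: alternative
-- what changed: A builds a char->letter dict and a counter while growing the output in one interleaved loop; B keeps no dict or counter at all and computes each output letter independently by a closed form, ascii_lowercase[len(set(word[:word.index(c)]))] - the number of distinct characters before c's first occurrence.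
import Mathlib
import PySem

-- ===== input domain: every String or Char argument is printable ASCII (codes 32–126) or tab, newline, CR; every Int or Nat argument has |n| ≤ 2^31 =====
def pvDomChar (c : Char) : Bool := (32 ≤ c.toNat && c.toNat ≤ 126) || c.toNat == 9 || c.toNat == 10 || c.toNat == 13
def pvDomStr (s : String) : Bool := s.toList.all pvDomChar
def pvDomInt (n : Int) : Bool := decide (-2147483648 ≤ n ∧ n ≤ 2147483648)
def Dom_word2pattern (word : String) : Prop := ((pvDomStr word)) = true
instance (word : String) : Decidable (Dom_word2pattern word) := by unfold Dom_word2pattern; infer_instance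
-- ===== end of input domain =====

-- B replaces A's interleaved dict/counter loop by a per-character closed form: each letter is alphabet[number of distinct chars before that char's first occurrence] (alternative; no dict at all, more work per character).


-- ===== PORT A =====
def word2pattern (word : String) : String :=
  let alphabet := "abcdefghijklmnopqrstuvwxyz".toList
  let st := word.toList.foldl (fun (st : List Char × PySem.Dict Char Char × Int) letter =>
    match st with
    | (buildPattern, dic, i) =>
      if ¬ dic.contains letter then
        -- alphabet[i]: IndexError when i ≥ 26 (27th distinct char) — excluded by Pre_
        let c := (PySem.List.pyGet? alphabet i).getD ' '
        (buildPattern ++ [c], dic.insert letter c, i + 1)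
      else
        -- dic[letter]: the key is present on this branch, so no KeyError
        (buildPattern ++ [dic.getD letter ' '], dic, i)
  ) ([], PySem.Dict.empty, 0)
  String.mk st.1

-- ===== PORT B =====
def word2pattern_alt (word : String) : String :=
  let alphabet := "abcdefghijklmnopqrstuvwxyz".toList
  let cs := word.toList
  -- ''.join(ascii_lowercase[len(set(word[:word.index(c)]))] for c in word)
  String.mk (cs.map (fun c =>
    -- word.index(c): c is drawn from word, so it occurs and no ValueError
    let f := ((PySem.List.index? cs c).getD 0 : Nat)
    -- ascii_lowercase[...]: IndexError when ≥ 26 distinct chars precede — excluded by Pre_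
    (PySem.List.pyGet? alphabet
      (((PySem.Set.ofList (PySem.List.slice cs none (some (f : Int)))).length : Nat) : Int)).getD ' '))

-- ===== PRECONDITION & SPEC =====
-- Pre_ excludes words with more than 26 distinct characters, on which the Python A (and B) raises IndexError.
def Pre_word2pattern (word : String) : Prop := (PySem.List.dedup word.toList).length ≤ 26
instance (word : String) : Decidable (Pre_word2pattern word) := by unfold Pre_word2pattern; infer_instance
def pvWitness_word2pattern : String := "hello"
def Spec_word2pattern (word : String) (out : String) : Prop := out = word2pattern_alt word
instance (word : String) (out : String) : Decidable (Spec_word2pattern word out) := by unfold Spec_word2pattern; infer_instance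

-- ===== CLAIM (what is proved, stated in full; the proofs are below) =====
def Claim_equal_word2pattern : Prop := ∀ (word : String), Dom_word2pattern word → Pre_word2pattern word → Spec_word2pattern word (word2pattern word)

-- ===== LEMMAS AND PROOFS =====
def pvAlph : List Char := "abcdefghijklmnopqrstuvwxyz".toList

-- the canonical letter of c given the first-appearance list `seen`
def pvAssign (seen : List Char) (c : Char) : Char := (pvAlph[seen.idxOf c]?).getD ' '

theorem pv_idxOf_append_not_mem {c : Char} {s : List Char} (u : List Char) (h : c ∉ s) :
    (s ++ u).idxOf c = s.length + u.idxOf c := by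
  induction s with
  | nil => simp
  | cons x s ih =>
    have hx : x ≠ c := fun e => h (by simp [e])
    have hc : c ∉ s := fun e => h (by simp [e])
    simp [hx, ih hc]
    ring

theorem pv_update_extends (l : List Char) : ∀ (s : List Char), ∃ t, PySem.Set.update s l = s ++ t := by
  induction l with
  | nil => intro s; exact ⟨[], by simp [PySem.Set.update]⟩
  | cons x l ih =>
    intro s
    have hstep : PySem.Set.update s (x :: l) = PySem.Set.update (PySem.Set.add s x) l := by
      simp [PySem.Set.update]
    by_cases hx : PySem.Set.contains s x
    · have hmem : x ∈ s := (PySem.Set.contains_iff s x).mp hx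
      have : PySem.Set.add s x = s := by simp [PySem.Set.add, hmem]
      rcases ih s with ⟨t, ht⟩
      exact ⟨t, by rw [hstep, this, ht]⟩
    · have hnm : x ∉ s := fun m => hx ((PySem.Set.contains_iff s x).mpr m)
      have : PySem.Set.add s x = s ++ [x] := by simp [PySem.Set.add, hnm]
      rcases ih (s ++ [x]) with ⟨t, ht⟩
      exact ⟨[x] ++ t, by rw [hstep, this, ht, List.append_assoc]⟩

-- key fact: c's index in the final first-appearance list equals the number of
-- distinct characters accumulated up to c's first occurrence
theorem pv_key (l : List Char) : ∀ (s : List Char) (c : Char), c ∈ l → c ∉ s →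
    (PySem.Set.update s l).idxOf c = (PySem.Set.update s (l.take (l.idxOf c))).length := by
  induction l with
  | nil => intro s c h; cases h
  | cons x l ih =>
    intro s c hc hs
    have hstep : ∀ (m : List Char), PySem.Set.update s (x :: m) = PySem.Set.update (PySem.Set.add s x) m := by
      intro m; simp [PySem.Set.update]
    by_cases hx : x = c
    · subst hx
      have hadd : PySem.Set.add s x = s ++ [x] := by simp [PySem.Set.add, hs]
      rcases pv_update_extends l (s ++ [x]) with ⟨t, ht⟩
      rw [List.idxOf_cons_self, List.take_zero]
      rw [hstep, hadd, ht, List.append_assoc, pv_idxOf_append_not_mem _ hs]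
      simp [PySem.Set.update]
    · have hx' : x ≠ c := hx
      have hcl : c ∈ l := by
        rcases List.mem_cons.mp hc with h | h
        · exact absurd h.symm hx'
        · exact h
      have hcs' : c ∉ PySem.Set.add s x := by
        intro hm
        by_cases hmem : PySem.Set.contains s x
        · have : PySem.Set.add s x = s := by
            simp [PySem.Set.add, (PySem.Set.contains_iff s x).mp hmem]
          exact hs (this ▸ hm)
        · have hnm : x ∉ s := fun m => hmem ((PySem.Set.contains_iff s x).mpr m)
          have : PySem.Set.add s x = s ++ [x] := by
            simp [PySem.Set.add, hnm]
          rcases List.mem_append.mp (this ▸ hm) with h | h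
          · exact hs h
          · exact hx' (List.mem_singleton.mp h).symm
      have hb : (x == c) = false := by simp [hx']
      simp only [List.idxOf_cons, hb, cond_false]
      have htake : (x :: l).take (List.idxOf c l + 1) = x :: l.take (List.idxOf c l) := rfl
      rw [htake, hstep, hstep, ih (PySem.Set.add s x) c hcl hcs']

-- A's loop: with dic encoding pvAssign of the final dedup on `seen`, the fold appends the translation
theorem pv_loopA (l : List Char) : ∀ (seen bp : List Char) (dic : PySem.Dict Char Char),
    (∀ c, dic.get? c = if c ∈ seen then some (pvAssign (PySem.Set.update seen l) c) else none) →
    (l.foldl (fun (st : List Char × PySem.Dict Char Char × Int) letter =>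
      match st with
      | (buildPattern, dic, i) =>
        if ¬ dic.contains letter then
          let c := (PySem.List.pyGet? pvAlph i).getD ' '
          (buildPattern ++ [c], dic.insert letter c, i + 1)
        else
          (buildPattern ++ [dic.getD letter ' '], dic, i)
      ) (bp, dic, (seen.length : Int))).1
      = bp ++ l.map (pvAssign (PySem.Set.update seen l)) := by
  induction l with
  | nil => intro seen bp dic _; simp
  | cons x l ih =>
    intro seen bp dic hdic
    have hupd : PySem.Set.update seen (x :: l) = PySem.Set.update (PySem.Set.add seen x) l := by
      simp [PySem.Set.update]
    simp only [List.foldl_cons]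
    by_cases hx : x ∈ seen
    · -- seen before: dic hit
      have hadd : PySem.Set.add seen x = seen := by
        simp [PySem.Set.add, hx]
      have hget : dic.get? x = some (pvAssign (PySem.Set.update seen (x :: l)) x) := by
        rw [hdic x, if_pos hx]
      have hcont : dic.contains x = true := by
        rw [PySem.Dict.contains_eq_isSome_get?, hget]; rfl
      rw [if_neg (by simp [hcont])]
      have hgd : dic.getD x ' ' = pvAssign (PySem.Set.update seen (x :: l)) x :=
        PySem.Dict.getD_of_get?_eq_some _ _ hget
      rw [ih seen (bp ++ [dic.getD x ' ']) dic (by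
        intro c; rw [hdic c, hupd, hadd])]
      rw [hupd, hadd] at hgd ⊢
      simp [hgd]
    · -- new character
      have hadd : PySem.Set.add seen x = seen ++ [x] := by
        simp [PySem.Set.add, hx]
      have hget : dic.get? x = none := by rw [hdic x, if_neg hx]
      have hcont : dic.contains x = false := by
        rw [PySem.Dict.contains_eq_isSome_get?, hget]; rfl
      rw [if_pos (by simp [hcont])]
      have hval : (PySem.List.pyGet? pvAlph ((seen.length : Nat) : Int)).getD ' '
          = pvAssign (PySem.Set.update seen (x :: l)) x := by
        rcases pv_update_extends l (seen ++ [x]) with ⟨t, ht⟩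
        have hidx : (PySem.Set.update seen (x :: l)).idxOf x = seen.length := by
          rw [hupd, hadd, ht, List.append_assoc, pv_idxOf_append_not_mem _ hx]
          simp
        simp only [pvAssign, hidx]
        simp
      have hlen : ((seen.length : Int) + 1) = (((seen ++ [x]).length : Nat) : Int) := by
        simp
      rw [hval, hlen,
        ih (seen ++ [x]) _ _ (by
          intro c
          rw [PySem.Dict.get?_insert (d := dic) (k := x)]
          by_cases hcx : c = x
          · subst hcx
            rw [hupd, hadd]
            simp
          · rw [if_neg hcx, hdic c, hupd, hadd]
            by_cases hcs : c ∈ seen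
            · simp [hcs, hcx]
            · simp [hcs, hcx])]
      rw [hupd, hadd]
      simp

theorem pv_A_eq (word : String) :
    word2pattern word = String.mk (word.toList.map (pvAssign (PySem.List.dedup word.toList))) := by
  change String.mk ((word.toList.foldl (fun (st : List Char × PySem.Dict Char Char × Int) letter =>
      match st with
      | (buildPattern, dic, i) =>
        if ¬ dic.contains letter then
          let c := (PySem.List.pyGet? pvAlph i).getD ' '
          (buildPattern ++ [c], dic.insert letter c, i + 1)
        else
          (buildPattern ++ [dic.getD letter ' '], dic, i)
      ) ([], PySem.Dict.empty, 0)).1) = _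
  have h := pv_loopA word.toList [] [] PySem.Dict.empty (by intro c; simp)
  simp only [List.length_nil, Nat.cast_zero, List.nil_append] at h
  rw [h]
  have hded : PySem.Set.update [] word.toList = PySem.List.dedup word.toList := by
    simp [PySem.Set.update, PySem.List.dedup_eq_ofList, PySem.Set.ofList_eq_foldl]
  rw [hded]

theorem pv_B_eq (word : String) :
    word2pattern_alt word = String.mk (word.toList.map (pvAssign (PySem.List.dedup word.toList))) := by
  change String.mk (word.toList.map (fun c =>
      (PySem.List.pyGet? pvAlph
        (((PySem.Set.ofList (PySem.List.slice word.toList none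
            (some ((((PySem.List.index? word.toList c).getD 0 : Nat) : Int))))).length : Nat) : Int)).getD ' ')) = _
  congr 1
  apply List.map_congr_left
  intro c hc
  have hidx : PySem.List.index? word.toList c = some (List.idxOf c word.toList) := by
    rw [PySem.List.index?_eq_idxOf?]
    have h1 : (List.idxOf? c word.toList).isSome := List.isSome_idxOf?.mpr hc
    rw [List.idxOf_eq_getD_idxOf?]
    cases he : List.idxOf? c word.toList
    · rw [he] at h1; simp at h1
    · simp
  rw [hidx]
  simp only [Option.getD_some]
  rw [PySem.List.slice_to_natCast]
  have hkey := pv_key word.toList [] c hc (by simp)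
  have hupd0 : ∀ (m : List Char), PySem.Set.update [] m = PySem.Set.ofList m := by
    intro m; simp [PySem.Set.update, PySem.Set.ofList_eq_foldl]
  rw [hupd0, hupd0] at hkey
  have hded : PySem.List.dedup word.toList = PySem.Set.ofList word.toList := by
    simp [PySem.List.dedup_eq_ofList]
  rw [pvAssign, hded, hkey]
  simp

-- ===== VERDICT (by name: the statement is the Claim_ definition above) =====
theorem word2pattern_spec : Claim_equal_word2pattern := by
  intro word _ _
  unfold Spec_word2pattern
  rw [pv_A_eq, pv_B_eq]
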